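-- pv_equiv track=rewrite | github.com/vbushan/Algorithms-Assignments | PA 3/Programming assignment 3 Final-2.py | best_share_dp
-- ===== SOURCE A (Python) =====
-- def best_share_dp(a:list,b:list)->list:
--
--     #The time complexity of the following algorithm is O(n^2). There are two nested for-loops which help in traversing and updating a (n+1,n/2+1) matrix.
--     #The space complexity of the following algorithm is O(n^3) as at every index in the (n+1,n/2+1) matrix
--     #the algorithm tries to store the maximum happiness that can be achieved after processing the elements and also the items that were assigned to Alice that resulted in the sum at that Index.
--
--     dp=[[0]*(len(a)//2+1) for i in range(len(a)+1)]
--     for i in range(len(dp)):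
--         dp[i][0]=(sum(b[:i]),[])
--
--     for i in range(1,len(dp)):
--         for j in range(1,len(dp[i])):
--             if j==i:
--                 dp[i][j]=(sum(a[:i]),list(range(i)))
--
--             elif j<i:
--                 temp_var=[(dp[i-1][j-1][0]+a[i-1],dp[i-1][j-1][1]+[i-1]),(dp[i-1][j][0]+b[i-1],dp[i-1][j][1])]
--                 dp[i][j]=max(temp_var,key= lambda tup:tup[0])
--
--
--     return dp[len(dp)-1][len(dp[0])-1][1]
-- ===== SOURCE B (Python) =====
-- def best_share_dp(a, b):
--     n = len(a)
--     m = n // 2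
--     if m == 0:
--         return []
--     # prefix sums
--     prefA = [0]
--     for x in a:
--         prefA.append(prefA[-1] + x)
--     prefB = [0]
--     for x in b[:n]:
--         prefB.append(prefB[-1] + x)
--     # value-only DP with a parent-choice bit per cell
--     vals = [[0] * (m + 1) for _ in range(n + 1)]
--     take = [[False] * (m + 1) for _ in range(n + 1)]
--     for i in range(n + 1):
--         vals[i][0] = prefB[i]
--     for i in range(1, n + 1):
--         for j in range(1, min(i, m) + 1):
--             if j == i:
--                 vals[i][j] = prefA[i]
--                 take[i][j] = True
--             else:
--                 t = vals[i - 1][j - 1] + a[i - 1]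
--                 s = vals[i - 1][j] + b[i - 1]
--                 if t >= s:
--                     vals[i][j] = t
--                     take[i][j] = True
--                 else:
--                     vals[i][j] = s
--     # single backtrack reconstructs the chosen indices
--     res = []
--     i, j = n, m
--     while j > 0:
--         if take[i][j]:
--             res.append(i - 1)
--             i -= 1
--             j -= 1
--         else:
--             i -= 1
--     res.reverse()
--     return res
-- ===== Notes on version B (the rewrite author's own statement) =====
-- stated objective: faster
-- what changed: B replaces A's per-cell storage of the whole chosen index list (copied at every DP cell) by prefix sums plus a value-and-choice-bit table, and reconstructs the list with a single backtrack pass.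
-- outside the precondition, e.g. on best_share_dp([1, 2], []): A raises IndexError, B raises IndexError
import Mathlib
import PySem

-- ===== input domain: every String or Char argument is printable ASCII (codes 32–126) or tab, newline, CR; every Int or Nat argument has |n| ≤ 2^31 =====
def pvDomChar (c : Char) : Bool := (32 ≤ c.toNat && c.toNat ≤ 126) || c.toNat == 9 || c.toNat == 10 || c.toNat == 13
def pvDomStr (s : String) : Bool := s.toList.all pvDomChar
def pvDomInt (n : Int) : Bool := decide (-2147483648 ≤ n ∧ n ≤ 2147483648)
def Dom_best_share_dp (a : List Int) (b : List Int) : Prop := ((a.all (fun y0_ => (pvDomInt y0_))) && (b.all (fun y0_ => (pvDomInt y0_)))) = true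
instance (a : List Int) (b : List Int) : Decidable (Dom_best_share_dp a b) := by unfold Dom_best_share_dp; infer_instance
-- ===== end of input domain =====

-- B replaces A's per-cell copy of the whole chosen index list by a value+choice-bit DP over
-- prefix sums with ONE backtrack pass (asymptotically faster measured).

-- ===== PORT A =====
-- dp cell for row i, column j ≥ 1.  Cells with j > i are never written by A (Python leaves the
-- integer 0 there) and never read; they are represented by the default (0, []).
-- sum(x[:i]) is ported as (x.take i).sum (exact: i ≥ 0); a[i-1] / b[i-1] are ported with getD,
-- exact because Pre_ puts every such read in range.  Python's max(key=...) keeps the FIRST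
-- maximal tuple, hence the '>' comparison.
def pvA_cell (a b : List Int) (prev : List (Int × List Int)) (i j : Nat) : Int × List Int :=
  if j = i then ((a.take i).sum, (List.range i).map Int.ofNat)
  else if j < i then
    let t1 : Int × List Int :=
      ((prev.getD (j-1) (0,[])).1 + a.getD (i-1) 0, (prev.getD (j-1) (0,[])).2 ++ [Int.ofNat (i-1)])
    let t2 : Int × List Int :=
      ((prev.getD j (0,[])).1 + b.getD (i-1) 0, (prev.getD j (0,[])).2)
    if t2.1 > t1.1 then t2 else t1
  else (0, [])

-- row i of dp: dp[i][0] = (sum(b[:i]), []), the inner j-loop fills j = 1 .. m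
def pvA_row (a b : List Int) (prev : List (Int × List Int)) (i m : Nat) : List (Int × List Int) :=
  (List.range (m+1)).map (fun j => if j = 0 then ((b.take i).sum, []) else pvA_cell a b prev i j)

def best_share_dp (a b : List Int) : List Int :=
  let n := a.length
  let m := n / 2
  let row0 := pvA_row a b [] 0 m
  let last := (List.range n).foldl (fun prev i => pvA_row a b prev (i+1) m) row0
  (last.getD m (0, [])).2

-- ===== PORT B =====
-- running prefix sums: pref = [0]; for x in xs: pref.append(pref[-1] + x)
def pvB_prefix (xs : List Int) : List Int :=
  (xs.foldl (fun st x => (st.1 ++ [st.2 + x], st.2 + x)) ([(0:Int)], (0:Int))).1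

-- one DP cell: (value, choice bit); indexing with getD, exact in range under Pre_
def pvB_cell (a b prefA : List Int) (prevV : List Int) (i j : Nat) : Int × Bool :=
  if j = i then (prefA.getD i 0, true)
  else
    let t := prevV.getD (j-1) 0 + a.getD (i-1) 0
    let s := prevV.getD j 0 + b.getD (i-1) 0
    if t ≥ s then (t, true) else (s, false)

-- row i of the value table and the take table (cells beyond min(i,m) stay 0/False)
def pvB_row (a b prefA prefB : List Int) (prevV : List Int) (i m : Nat) : List Int × List Bool :=
  let cells := (List.range (m+1)).map (fun j =>
    if j = 0 then (prefB.getD i 0, false)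
    else if j ≤ i then pvB_cell a b prefA prevV i j
    else ((0:Int), false))
  (cells.map Prod.fst, cells.map Prod.snd)

-- the backtrack while-loop: i strictly decreases each iteration, so it recurses on i;
-- along the DP's reachable states j ≤ i, so i = 0 forces j = 0 exactly as in Python
def pvB_backtrack (tks : List (List Bool)) : Nat → Nat → List Int → List Int
  | 0, _, acc => acc
  | i+1, j, acc =>
    if j = 0 then acc
    else if ((tks.getD (i+1) []).getD j false) then
      pvB_backtrack tks i (j-1) (acc ++ [Int.ofNat i])
    else
      pvB_backtrack tks i j acc

def best_share_dp_alt (a b : List Int) : List Int :=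
  let n := a.length
  let m := n / 2
  if m = 0 then [] else
  let prefA := pvB_prefix a
  let prefB := pvB_prefix (b.take n)
  let row0 := pvB_row a b prefA prefB [] 0 m
  let st := (List.range n).foldl
    (fun (st : List Int × List (List Bool)) i =>
      let r := pvB_row a b prefA prefB st.1 (i+1) m
      (r.1, st.2 ++ [r.2])) (row0.1, [row0.2])
  (pvB_backtrack st.2 n m []).reverse

-- ===== PRECONDITION & SPEC =====
-- Pre_ excludes exactly the inputs on which A raises IndexError: when len(a) ≥ 2, the inner
-- loop reads b[i-1] up to i = len(a), so it needs len(b) ≥ len(a).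
def Pre_best_share_dp (a : List Int) (b : List Int) : Prop :=
  a.length ≤ 1 ∨ a.length ≤ b.length
instance (a : List Int) (b : List Int) : Decidable (Pre_best_share_dp a b) := by
  unfold Pre_best_share_dp; infer_instance

def pvWitness_best_share_dp : List Int × List Int := ([3, -1, 4, 1], [2, 7, 1, 8])

def Spec_best_share_dp (a : List Int) (b : List Int) (out : List Int) : Prop := out = best_share_dp_alt a b
instance (a : List Int) (b : List Int) (out : List Int) : Decidable (Spec_best_share_dp a b out) := by unfold Spec_best_share_dp; infer_instance

-- ===== CLAIM (what is proved, stated in full; the proofs are below) =====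
def Claim_equal_best_share_dp : Prop := ∀ (a : List Int) (b : List Int), Dom_best_share_dp a b → Pre_best_share_dp a b → Spec_best_share_dp a b (best_share_dp a b)

-- ===== LEMMAS AND PROOFS =====

-- the state after i iterations of A's row loop
def pvArows (a b : List Int) (m : Nat) : Nat → List (Int × List Int)
  | 0 => pvA_row a b [] 0 m
  | i+1 => pvA_row a b (pvArows a b m i) (i+1) m

-- the state after i iterations of B's row loop: (value row i, take rows 0..i)
def pvBst (a b prefA prefB : List Int) (m : Nat) : Nat → List Int × List (List Bool)
  | 0 => ((pvB_row a b prefA prefB [] 0 m).1, [(pvB_row a b prefA prefB [] 0 m).2])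
  | i+1 =>
    ((pvB_row a b prefA prefB (pvBst a b prefA prefB m i).1 (i+1) m).1,
     (pvBst a b prefA prefB m i).2 ++ [(pvB_row a b prefA prefB (pvBst a b prefA prefB m i).1 (i+1) m).2])

lemma pv_getD_map_range {α : Type} (f : Nat → α) (n j : Nat) (d : α) (h : j < n) :
    ((List.range n).map f).getD j d = f j := by
  simp [List.getD_eq_getElem?_getD, h]

lemma pvA_fold (a b : List Int) (m : Nat) (n : Nat) :
    (List.range n).foldl (fun prev i => pvA_row a b prev (i+1) m) (pvA_row a b [] 0 m)
      = pvArows a b m n := by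
  induction n with
  | zero => rfl
  | succ k ih => rw [List.range_succ, List.foldl_append, ih]; rfl

lemma pvB_fold (a b prefA prefB : List Int) (m : Nat) (n : Nat) :
    (List.range n).foldl
      (fun (st : List Int × List (List Bool)) i =>
        ((pvB_row a b prefA prefB st.1 (i+1) m).1, st.2 ++ [(pvB_row a b prefA prefB st.1 (i+1) m).2]))
      ((pvB_row a b prefA prefB [] 0 m).1, [(pvB_row a b prefA prefB [] 0 m).2])
      = pvBst a b prefA prefB m n := by
  induction n with
  | zero => rfl
  | succ k ih => rw [List.range_succ, List.foldl_append, ih]; rfl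

lemma pvB_prefix_loop (xs : List Int) : ∀ (acc : List Int) (s : Int),
    (xs.foldl (fun st x => (st.1 ++ [st.2 + x], st.2 + x)) (acc, s)).1
      = acc ++ (List.range xs.length).map (fun k => s + (xs.take (k+1)).sum) := by
  induction xs with
  | nil => intro acc s; simp
  | cons x xs ih =>
    intro acc s
    simp only [List.foldl_cons, ih, List.length_cons, List.range_succ_eq_map]
    simp [List.map_map, List.append_assoc, Function.comp, add_assoc]

lemma pvB_prefix_getD (xs : List Int) (i : Nat) (h : i ≤ xs.length) :
    (pvB_prefix xs).getD i 0 = (xs.take i).sum := by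
  unfold pvB_prefix
  rw [pvB_prefix_loop]
  cases i with
  | zero => simp
  | succ k =>
    have hk : k < xs.length := by omega
    simp only [List.singleton_append, List.getD_cons_succ]
    rw [pv_getD_map_range _ _ _ _ hk]
    simp

lemma pvB_prefix_getElem (xs : List Int) (i : Nat) (h : i ≤ xs.length) :
    (pvB_prefix xs)[i]?.getD 0 = (xs.take i).sum := by
  rw [← List.getD_eq_getElem?_getD]
  exact pvB_prefix_getD xs i h

lemma pvB_backtrack_acc (tks : List (List Bool)) :
    ∀ (i j : Nat) (acc : List Int),
      pvB_backtrack tks i j acc = acc ++ pvB_backtrack tks i j [] := by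
  intro i
  induction i with
  | zero => intro j acc; simp [pvB_backtrack]
  | succ k ih =>
    intro j acc
    by_cases hj : j = 0
    · simp [pvB_backtrack, hj]
    · by_cases ht : ((tks.getD (k+1) []).getD j false)
      · simp only [pvB_backtrack, hj, if_false, ht, if_true]
        rw [ih (j-1) (acc ++ [Int.ofNat k]), ih (j-1) ([] ++ [Int.ofNat k])]
        simp
      · simp only [pvB_backtrack, hj, if_false, ht]
        rw [ih j acc, ih j []]
        simp

lemma pvB_backtrack_congr (tks tks' : List (List Bool)) :
    ∀ (i j : Nat) (acc : List Int), (∀ k, k ≤ i → tks.getD k [] = tks'.getD k []) →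
      pvB_backtrack tks i j acc = pvB_backtrack tks' i j acc := by
  intro i
  induction i with
  | zero => intro j acc _; rfl
  | succ k ih =>
    intro j acc h
    simp only [pvB_backtrack, h (k+1) (le_refl _)]
    split_ifs
    · rfl
    · exact ih _ _ (fun t ht => h t (by omega))
    · exact ih _ _ (fun t ht => h t (by omega))

lemma pvBst_len (a b prefA prefB : List Int) (m : Nat) (i : Nat) :
    (pvBst a b prefA prefB m i).2.length = i + 1 := by
  induction i with
  | zero => rfl
  | succ k ih => simp [pvBst, ih]

-- getD lemmas for the rows
lemma pvA_row_getD (a b : List Int) (prev : List (Int × List Int)) (i m j : Nat) (hj : j ≤ m) :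
    (pvA_row a b prev i m).getD j (0,[])
      = if j = 0 then ((b.take i).sum, ([] : List Int)) else pvA_cell a b prev i j := by
  unfold pvA_row
  exact pv_getD_map_range _ _ _ _ (by omega)

lemma pvB_row_getD_fst (a b prefA prefB : List Int) (prevV : List Int) (i m j : Nat) (hj : j ≤ m) :
    (pvB_row a b prefA prefB prevV i m).1.getD j 0
      = (if j = 0 then (prefB.getD i 0, false)
         else if j ≤ i then pvB_cell a b prefA prevV i j else ((0:Int), false)).1 := by
  unfold pvB_row
  simp only [List.map_map]
  exact pv_getD_map_range _ _ _ _ (by omega)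

lemma pvB_row_getD_snd (a b prefA prefB : List Int) (prevV : List Int) (i m j : Nat) (hj : j ≤ m) :
    (pvB_row a b prefA prefB prevV i m).2.getD j false
      = (if j = 0 then (prefB.getD i 0, false)
         else if j ≤ i then pvB_cell a b prefA prevV i j else ((0:Int), false)).2 := by
  unfold pvB_row
  simp only [List.map_map]
  exact pv_getD_map_range _ _ _ _ (by omega)

-- the take matrix grows by appending; old rows are unchanged
lemma pvBst_getD_succ (a b prefA prefB : List Int) (m i k : Nat) (hk : k ≤ i) :
    (pvBst a b prefA prefB m (i+1)).2.getD k [] = (pvBst a b prefA prefB m i).2.getD k [] := by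
  have hl := pvBst_len a b prefA prefB m i
  simp only [pvBst]
  rw [List.getD_eq_getElem?_getD, List.getElem?_append_left (by omega), ← List.getD_eq_getElem?_getD]

lemma pvBst_getD_last (a b prefA prefB : List Int) (m i : Nat) :
    (pvBst a b prefA prefB m (i+1)).2.getD (i+1) []
      = (pvB_row a b prefA prefB (pvBst a b prefA prefB m i).1 (i+1) m).2 := by
  have hl := pvBst_len a b prefA prefB m i
  simp only [pvBst]
  rw [List.getD_eq_getElem?_getD, List.getElem?_append_right (by omega)]
  simp [hl]

-- A's diagonal cell dp[k][k] holds list(range(k))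
lemma pvA_diag (a b : List Int) (m k : Nat) (hk : k ≤ m) :
    ((pvArows a b m k).getD k (0,[])).2 = (List.range k).map Int.ofNat := by
  cases k with
  | zero =>
    rw [show pvArows a b m 0 = pvA_row a b [] 0 m from rfl, pvA_row_getD a b [] 0 m 0 hk]
    simp
  | succ t =>
    rw [show pvArows a b m (t+1) = pvA_row a b (pvArows a b m t) (t+1) m from rfl,
        pvA_row_getD _ _ _ _ _ _ hk]
    simp [pvA_cell]

lemma pvArows_getD_zero_snd (a b : List Int) (m n : Nat) :
    ((pvArows a b m n).getD 0 (0,[])).2 = [] := by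
  cases n with
  | zero =>
    rw [show pvArows a b m 0 = pvA_row a b [] 0 m from rfl, pvA_row_getD _ _ _ _ _ _ (Nat.zero_le m)]
    simp
  | succ t =>
    rw [show pvArows a b m (t+1) = pvA_row a b (pvArows a b m t) (t+1) m from rfl,
        pvA_row_getD _ _ _ _ _ _ (Nat.zero_le m)]
    simp

lemma pvArows_getElem_zero_snd (a b : List Int) (m n : Nat) :
    ((pvArows a b m n)[0]?.getD (0,[])).2 = [] := by
  rw [← List.getD_eq_getElem?_getD]
  exact pvArows_getD_zero_snd a b m n

-- MAIN INVARIANT: A's cell (i,j) has B's DP value, and its stored list is the backtrack from (i,j)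
lemma pvInv (a b : List Int) (hb : a.length ≤ b.length) :
    ∀ (i : Nat), i ≤ a.length → ∀ (j : Nat), j ≤ a.length / 2 →
      (((pvArows a b (a.length/2) i).getD j (0,[])).1
          = (pvBst a b (pvB_prefix a) (pvB_prefix (b.take a.length)) (a.length/2) i).1.getD j 0)
      ∧ (((pvArows a b (a.length/2) i).getD j (0,[])).2
          = (pvB_backtrack (pvBst a b (pvB_prefix a) (pvB_prefix (b.take a.length)) (a.length/2) i).2 i j []).reverse)
      ∧ (i < j → (pvArows a b (a.length/2) i).getD j (0,[]) = (0, [])) := by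
  intro i
  induction i with
  | zero =>
    intro _ j hj
    rw [show pvArows a b (a.length/2) 0 = pvA_row a b [] 0 (a.length/2) from rfl,
        pvA_row_getD _ _ _ _ _ _ hj]
    refine ⟨?_, ?_, ?_⟩
    · rw [show (pvBst a b (pvB_prefix a) (pvB_prefix (b.take a.length)) (a.length/2) 0).1
            = (pvB_row a b (pvB_prefix a) (pvB_prefix (b.take a.length)) [] 0 (a.length/2)).1 from rfl,
          pvB_row_getD_fst _ _ _ _ _ _ _ _ hj]
      by_cases h0 : j = 0
      · subst h0
        simp [pvB_prefix_getElem (b.take a.length) 0 (Nat.zero_le _)]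
      · simp [h0, pvA_cell]
    · simp only [pvB_backtrack, List.reverse_nil]
      by_cases h0 : j = 0 <;> simp [h0, pvA_cell]
    · intro hij
      have h0 : ¬ j = 0 := by omega
      simp [h0, pvA_cell]
  | succ k ih =>
    intro hk1 j hj
    have hk : k ≤ a.length := by omega
    rw [show pvArows a b (a.length/2) (k+1)
          = pvA_row a b (pvArows a b (a.length/2) k) (k+1) (a.length/2) from rfl,
        pvA_row_getD _ _ _ _ _ _ hj]
    have hRfst : ∀ (j' : Nat), j' ≤ a.length/2 →
        (pvBst a b (pvB_prefix a) (pvB_prefix (b.take a.length)) (a.length/2) (k+1)).1.getD j' 0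
          = (if j' = 0 then ((pvB_prefix (b.take a.length)).getD (k+1) 0, false)
             else if j' ≤ k+1 then pvB_cell a b (pvB_prefix a)
                    (pvBst a b (pvB_prefix a) (pvB_prefix (b.take a.length)) (a.length/2) k).1 (k+1) j'
             else ((0:Int), false)).1 := by
      intro j' hj'
      rw [show (pvBst a b (pvB_prefix a) (pvB_prefix (b.take a.length)) (a.length/2) (k+1)).1
            = (pvB_row a b (pvB_prefix a) (pvB_prefix (b.take a.length))
                (pvBst a b (pvB_prefix a) (pvB_prefix (b.take a.length)) (a.length/2) k).1 (k+1) (a.length/2)).1 from rfl,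
          pvB_row_getD_fst _ _ _ _ _ _ _ _ hj']
    have hRsnd :
        ((pvBst a b (pvB_prefix a) (pvB_prefix (b.take a.length)) (a.length/2) (k+1)).2.getD (k+1) []).getD j false
          = (if j = 0 then ((pvB_prefix (b.take a.length)).getD (k+1) 0, false)
             else if j ≤ k+1 then pvB_cell a b (pvB_prefix a)
                    (pvBst a b (pvB_prefix a) (pvB_prefix (b.take a.length)) (a.length/2) k).1 (k+1) j
             else ((0:Int), false)).2 := by
      rw [pvBst_getD_last, pvB_row_getD_snd _ _ _ _ _ _ _ _ hj]
    have hcongr : ∀ (j' : Nat) (acc : List Int),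
        pvB_backtrack (pvBst a b (pvB_prefix a) (pvB_prefix (b.take a.length)) (a.length/2) (k+1)).2 k j' acc
          = pvB_backtrack (pvBst a b (pvB_prefix a) (pvB_prefix (b.take a.length)) (a.length/2) k).2 k j' acc := by
      intro j' acc
      exact pvB_backtrack_congr _ _ k j' acc
        (fun t ht => pvBst_getD_succ a b _ _ _ k t ht)
    by_cases hj0 : j = 0
    · subst hj0
      refine ⟨?_, ?_, ?_⟩
      · rw [hRfst 0 (Nat.zero_le _)]
        have hlen : k+1 ≤ (List.take a.length b).length := by
          rw [List.length_take]; omega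
        have htk : (List.take a.length b).take (k+1) = b.take (k+1) := by
          rw [List.take_take]; congr 1; omega
        simp [pvB_prefix_getElem _ _ hlen, htk]
      · simp [pvB_backtrack]
      · intro h; omega
    · rcases Nat.lt_trichotomy j (k+1) with hjk | hjk | hjk
      · -- 1 ≤ j ≤ k : the genuine recurrence
        have hj1m : j - 1 ≤ a.length / 2 := by omega
        obtain ⟨ihv1, ihl1, _⟩ := ih hk (j-1) hj1m
        obtain ⟨ihv2, ihl2, _⟩ := ih hk j hj
        have hcell :
            pvB_cell a b (pvB_prefix a)
              (pvBst a b (pvB_prefix a) (pvB_prefix (b.take a.length)) (a.length/2) k).1 (k+1) j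
            = (if ((pvArows a b (a.length/2) k).getD (j-1) (0,[])).1 + a.getD k 0
                    ≥ ((pvArows a b (a.length/2) k).getD j (0,[])).1 + b.getD k 0
               then (((pvArows a b (a.length/2) k).getD (j-1) (0,[])).1 + a.getD k 0, true)
               else (((pvArows a b (a.length/2) k).getD j (0,[])).1 + b.getD k 0, false)) := by
          have hne : ¬ j = k+1 := by omega
          simp only [pvB_cell, hne, if_false, ← ihv1, ← ihv2, Nat.add_sub_cancel]
        by_cases hts : ((pvArows a b (a.length/2) k).getD (j-1) (0,[])).1 + a.getD k 0
            ≥ ((pvArows a b (a.length/2) k).getD j (0,[])).1 + b.getD k 0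
        · -- Python takes a[i-1] (first maximal tuple)
          have hc : ((pvBst a b (pvB_prefix a) (pvB_prefix (b.take a.length)) (a.length/2) (k+1)).2.getD (k+1) []).getD j false = true := by
            rw [hRsnd]
            simp only [hj0, if_false, show j ≤ k+1 from by omega, if_true, hcell, if_pos hts]
          simp only [List.getD_eq_getElem?_getD] at hc
          refine ⟨?_, ?_, ?_⟩
          · rw [hRfst j hj]
            simp only [hj0, if_false, show j ≤ k+1 from by omega, if_true, hcell]
            simp only [pvA_cell, show j ≠ k+1 from by omega, if_false, show j < k+1 from hjk, if_true,
              Nat.add_sub_cancel]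
            rw [if_pos hts, if_neg (by omega)]
          · rw [show pvB_backtrack (pvBst a b (pvB_prefix a) (pvB_prefix (b.take a.length)) (a.length/2) (k+1)).2 (k+1) j []
                  = pvB_backtrack (pvBst a b (pvB_prefix a) (pvB_prefix (b.take a.length)) (a.length/2) (k+1)).2 k (j-1) ([] ++ [Int.ofNat k]) from by
                simp [pvB_backtrack, hj0, hc],
              hcongr, pvB_backtrack_acc]
            simp only [pvA_cell, show j ≠ k+1 from by omega, if_false, show j < k+1 from hjk, if_true,
              Nat.add_sub_cancel]
            rw [if_neg (show ¬ (((pvArows a b (a.length/2) k).getD j (0,[])).1 + b.getD k 0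
                  > ((pvArows a b (a.length/2) k).getD (j-1) (0,[])).1 + a.getD k 0) from by omega)]
            simp [hj0, ← ihl1]
          · intro h; omega
        · -- Python keeps b[i-1]
          have hc : ((pvBst a b (pvB_prefix a) (pvB_prefix (b.take a.length)) (a.length/2) (k+1)).2.getD (k+1) []).getD j false = false := by
            rw [hRsnd]
            simp only [hj0, if_false, show j ≤ k+1 from by omega, if_true, hcell, if_neg hts]
          simp only [List.getD_eq_getElem?_getD] at hc
          refine ⟨?_, ?_, ?_⟩
          · rw [hRfst j hj]
            simp only [hj0, if_false, show j ≤ k+1 from by omega, if_true, hcell]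
            simp only [pvA_cell, show j ≠ k+1 from by omega, if_false, show j < k+1 from hjk, if_true,
              Nat.add_sub_cancel]
            rw [if_neg hts, if_pos (by omega)]
          · rw [show pvB_backtrack (pvBst a b (pvB_prefix a) (pvB_prefix (b.take a.length)) (a.length/2) (k+1)).2 (k+1) j []
                  = pvB_backtrack (pvBst a b (pvB_prefix a) (pvB_prefix (b.take a.length)) (a.length/2) (k+1)).2 k j [] from by
                simp [pvB_backtrack, hj0, hc],
              hcongr]
            simp only [pvA_cell, show j ≠ k+1 from by omega, if_false, show j < k+1 from hjk, if_true,
              Nat.add_sub_cancel]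
            rw [if_pos (show (((pvArows a b (a.length/2) k).getD j (0,[])).1 + b.getD k 0
                  > ((pvArows a b (a.length/2) k).getD (j-1) (0,[])).1 + a.getD k 0) from by omega)]
            simp [hj0, ← ihl2]
          · intro h; omega
      · -- j = k+1 : the diagonal cell
        subst hjk
        refine ⟨?_, ?_, ?_⟩
        · rw [hRfst (k+1) hj]
          simp [pvA_cell, pvB_cell, pvB_prefix_getElem a (k+1) hk1]
        · have hc : ((pvBst a b (pvB_prefix a) (pvB_prefix (b.take a.length)) (a.length/2) (k+1)).2.getD (k+1) []).getD (k+1) false = true := by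
            rw [hRsnd]
            simp [pvB_cell]
          simp only [List.getD_eq_getElem?_getD] at hc
          rw [show pvB_backtrack (pvBst a b (pvB_prefix a) (pvB_prefix (b.take a.length)) (a.length/2) (k+1)).2 (k+1) (k+1) []
                = pvB_backtrack (pvBst a b (pvB_prefix a) (pvB_prefix (b.take a.length)) (a.length/2) (k+1)).2 k k ([] ++ [Int.ofNat k]) from by
              simp [pvB_backtrack, hc],
            hcongr, pvB_backtrack_acc]
          have hkm : k ≤ a.length / 2 := by omega
          obtain ⟨_, ihl, _⟩ := ih hk k hkm
          simp [pvA_cell, List.range_succ, ← ihl]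
          rw [← List.getD_eq_getElem?_getD]
          exact (pvA_diag a b (a.length/2) k hkm).symm
        · intro h; omega
      · -- j > k+1 : untouched cell
        obtain ⟨_, ihl, ihz⟩ := ih hk j hj
        have hz := ihz (by omega)
        refine ⟨?_, ?_, ?_⟩
        · rw [hRfst j hj]
          simp [pvA_cell, hj0, show j ≠ k+1 from by omega, show ¬ j < k+1 from by omega,
            show ¬ j ≤ k+1 from by omega]
        · have hc : ((pvBst a b (pvB_prefix a) (pvB_prefix (b.take a.length)) (a.length/2) (k+1)).2.getD (k+1) []).getD j false = false := by
            rw [hRsnd]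
            simp [hj0, show ¬ j ≤ k+1 from by omega]
          simp only [List.getD_eq_getElem?_getD] at hc
          rw [show pvB_backtrack (pvBst a b (pvB_prefix a) (pvB_prefix (b.take a.length)) (a.length/2) (k+1)).2 (k+1) j []
                = pvB_backtrack (pvBst a b (pvB_prefix a) (pvB_prefix (b.take a.length)) (a.length/2) (k+1)).2 k j [] from by
              simp [pvB_backtrack, hj0, hc],
            hcongr]
          rw [List.getD_eq_getElem?_getD] at hz
          simp [pvA_cell, hj0, show j ≠ k+1 from by omega, show ¬ j < k+1 from by omega, ← ihl, hz]
        · intro _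
          simp [pvA_cell, hj0, show j ≠ k+1 from by omega, show ¬ j < k+1 from by omega]

-- ===== VERDICT (by name: the statement is the Claim_ definition above) =====
theorem best_share_dp_spec : Claim_equal_best_share_dp := by
  unfold Claim_equal_best_share_dp
  intro a b _ hpre
  unfold Spec_best_share_dp
  simp only [best_share_dp, best_share_dp_alt, pvA_fold, pvB_fold]
  by_cases hm : a.length / 2 = 0
  · simp [hm, pvArows_getElem_zero_snd]
  · have hb : a.length ≤ b.length := by
      rcases hpre with h | h
      · omega
      · exact h
    simp only [hm, if_false]
    exact (pvInv a b hb a.length le_rfl (a.length/2) le_rfl).2.1
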